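/- GENERATED by mk_final_copies.py from the proof of the farm's unit `stb_vorbis_close` (farm:stb_vorbis_close.1: Proof.lean) as the
   re-elaboration sweep compiled it — do not edit. -/
import Asan.CheckWalk
import Vorbis.Spec.Units.stb_vorbis_close

open X86 X86.User Asan Vorbis Vorbis.Spec

set_option maxRecDepth 4000
set_option maxHeartbeats 4000000

namespace Vorbis.Spec.stb_vorbis_close

/-- **Every allocated block is kept by stores into the own stack frame**: a memory that differs from the entry memory only in
the 112 bytes below the entry stack pointer (the push of rbx, the return addresses, the callees' frames) reads the same inside
every allocated block, because a live block lies off the stack below `rsp + 8` (`live_where`). This is what carries `DeinitOK`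
from the entry of stb_vorbis_close to the entry of vorbis_deinit (`DeinitOK.agree`). -/
theorem allKept_frame {others : List Obj} {frames : List (Nat × FrameLayout)} {Blk : Block → Prop} {u : State} {m : Mem}
    (hsh : ShadowPre others frames u) (hok : BlkOK Blk) (hlive : BlkLive Blk (Live (stackObjs frames ++ others)))
    (hroom : 0x700000 + 112 ≤ (u.reg .rsp).toNat) (htop : (u.reg .rsp).toNat + 8 ≤ 0x800000)
    (hsame : Mem.SameExcept [⟨(u.reg .rsp).toNat - 112, (u.reg .rsp).toNat⟩] u.mem m) :
    AllKept Blk u.mem m := by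
  intro B hB
  by_cases hz : B.size = 0
  · refine ⟨?_, hok.no_wrap hB⟩
    simp only [vblock]
    intro a h1 h2
    omega
  · apply Block.Kept.of_sameExcept hsame ?_ (hok.no_wrap hB)
    intro w hw
    have e1 : w = ⟨(u.reg .rsp).toNat - 112, (u.reg .rsp).toNat⟩ := List.mem_singleton.mp hw
    subst e1
    simp only
    have := live_where (hlive B hB) hsh.inv hsh.offText (by omega) (by omega)
    omega

end Vorbis.Spec.stb_vorbis_close

/-- `stb_vorbis_close` satisfies its contract: `if (p == NULL) return; vorbis_deinit(p); setup_free(p, p);`. Two paths: the NULL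
path is `test ; je ; ret`; the other pushes rbx, calls vorbis_deinit (its `DeinitOK` carried over the two stack stores by
`allKept_frame`), then setup_free (`ObjLive` from OB1), pops rbx and returns. No check site, no store but into the own frame. -/
theorem Vorbis.Spec.Worked.stb_vorbis_close_ok : Vorbis.Spec.stb_vorbis_close.Statement := by
  intro Lay hLay μ hμ u₀ hcode h_deinit h_free others frames Blk u ret he hpre
  v_entry he
  have hd := h_deinit others frames Blk
  have hf := h_free others frames
  obtain ⟨hsh, hcase⟩ := hpre
  -- 10c560H (stb_vorbis_fixed.c:4300 `if (p == NULL) return;`) … the call of vorbis_deinit at 10c569H (c:4301)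
  u_walk hcode [hμ.vendor] span [Vorbis.L.textLo, Vorbis.L.textHi] side (v_side)
  case call_inv => v_inv
  case pre_10c569 =>
    -- the precondition of vorbis_deinit(p): p ≠ NULL, so the pre gives DeinitOK; two stack stores since the entry
    obtain ⟨hok, hlive, hdein⟩ := hcase.resolve_left (by
      intro h0
      apply hbr_10c563
      rw [h0]
      rfl)
    have c_rdi : s_10c569.reg .rdi = u.reg .rdi := w_kept.get .rdi rfl
    refine ⟨?_, hok, hlive, ?_⟩
    · show ShadowPre others frames s_10c569
      refine hsh.callee ?_ ?_ ?_ ?_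
      · v_untouched
      · rw [w_rsp]
        u_omega
      · rw [w_rsp]
        u_omega
      · rw [w_rsp]
        u_omega
    · rw [c_rdi]
      refine hdein.agree (Vorbis.Spec.stb_vorbis_close.allKept_frame hsh hok hlive he_room he_top ?_)
      u_same
  · -- the NULL path: 10c57bH `ret` (c:4303)
    refine ReachVia.done ?_
    v_returned
    show ShadowUntouched u.mem s_10c57b.mem
    v_untouched
  · -- after vorbis_deinit: 10c56eH (c:4302 `setup_free(p,p);`)
    obtain ⟨hok, hlive, hdein⟩ := hcase.resolve_left (by
      intro h0
      apply hbr_10c563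
      rw [h0]
      rfl)
    v_after_call w_rsp_10c569 w_mem_10c569
    have hs0 : UInt64.ofNat (s_10c569r.mem.readLE (u.reg .rsp) 8) = ret := by
      u_frame he_retAddr
    have hp1 : UInt64.ofNat (s_10c569.mem.readLE (u.reg .rsp - 8) 8) = u.reg .rbx := by
      u_resolve
    rw [w_mem_10c569] at hp1
    have w_same1 := w_same
    have hs1 : UInt64.ofNat (s_10c569r.mem.readLE (u.reg .rsp - 8) 8) = u.reg .rbx := by
      u_frame hp1
    u_walk hcode [hμ.vendor] span [Vorbis.L.textLo, Vorbis.L.textHi] side (v_side)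
    case call_inv => v_inv
    case pre_10c574 =>
      -- the precondition of setup_free(p, p): the shadow clause and `*p` live (OB1)
      refine ⟨?_, ?_⟩
      · show ShadowPre others frames s_10c574
        refine hsh.callee ?_ ?_ ?_ ?_
        · v_untouched
        · rw [w_rsp]
          u_omega
        · rw [w_rsp]
          u_omega
        · rw [w_rsp]
          u_omega
      · rw [w_rdi]
        exact ObjLive.of_ob1 hlive hdein.ob1
    -- after setup_free: 10c579H `pop rbx ; ret` (c:4303)
    v_after_call w_rsp_10c574 w_mem_10c574
    have hs0' : UInt64.ofNat (s_10c574r.mem.readLE (u.reg .rsp) 8) = ret := by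
      u_frame hs0
    have hs1' : UInt64.ofNat (s_10c574r.mem.readLE (u.reg .rsp - 8) 8) = u.reg .rbx := by
      u_frame hs1
    u_walk hcode [hμ.vendor] span [Vorbis.L.textLo, Vorbis.L.textHi] side (v_side)
    refine ReachVia.done ?_
    v_returned
    show ShadowUntouched u.mem s_10c57a.mem
    v_untouched
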